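-- pv_equiv track=rewrite | github.com/habibhamdoun/programmable-matter-project | test_single_agent.py | create_simple_test_case
-- ===== SOURCE A (Python) =====
-- def create_simple_test_case(grid_size=10):
--     """
--     Create a simple test case with a small grid and few cells.
--
--     Args:
--         grid_size (int): Size of the grid
--
--     Returns:
--         tuple: (target_shape, obstacles)
--     """
--     # Create a simple square shape
--     target_shape = []
--     center = grid_size // 2
--     size = 2
--     for r in range(center - size, center + size + 1):
--         for c in range(center - size, center + size + 1):
--             if r == center - size or r == center + size or c == center - size or c == center + size:
--                 target_shape.append((r, c))
--
--     # Create simple obstacles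
--     obstacles = set()
--     for r in range(grid_size):
--         for c in range(grid_size):
--             if r == 0 or r == grid_size - 1 or c == 0 or c == grid_size - 1:
--                 obstacles.add((r, c))
--
--     return target_shape, obstacles
-- ===== SOURCE B (Python) =====
-- def _border(lo, hi):
--     """All cells of the square [lo,hi]x[lo,hi] lying on its border, row-major."""
--     if lo > hi:
--         return []
--     if lo < hi:
--         cells = [(lo, c) for c in range(lo, hi + 1)]
--         for r in range(lo + 1, hi):
--             cells.append((r, lo))
--             cells.append((r, hi))
--         cells.extend((hi, c) for c in range(lo, hi + 1))
--         return cells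
--     return [(lo, c) for c in range(lo, hi + 1)]
--
--
-- def create_simple_test_case(grid_size=10):
--     """
--     Create a simple test case with a small grid and few cells.
--
--     Args:
--         grid_size (int): Size of the grid
--
--     Returns:
--         tuple: (target_shape, obstacles)
--     """
--     center = grid_size // 2
--     target_shape = _border(center - 2, center + 2)
--     obstacles = set(_border(0, grid_size - 1))
--     return target_shape, obstacles
-- ===== Notes on version B (the rewrite author's own statement) =====
-- stated objective: faster
-- what changed: Instead of scanning the full grid (and the full 5x5 square) and testing every cell for being on the border, B generates the border cells directly with a shared helper that emits the top row, the two side cells of each middle row, and the bottom row.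
import Mathlib
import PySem

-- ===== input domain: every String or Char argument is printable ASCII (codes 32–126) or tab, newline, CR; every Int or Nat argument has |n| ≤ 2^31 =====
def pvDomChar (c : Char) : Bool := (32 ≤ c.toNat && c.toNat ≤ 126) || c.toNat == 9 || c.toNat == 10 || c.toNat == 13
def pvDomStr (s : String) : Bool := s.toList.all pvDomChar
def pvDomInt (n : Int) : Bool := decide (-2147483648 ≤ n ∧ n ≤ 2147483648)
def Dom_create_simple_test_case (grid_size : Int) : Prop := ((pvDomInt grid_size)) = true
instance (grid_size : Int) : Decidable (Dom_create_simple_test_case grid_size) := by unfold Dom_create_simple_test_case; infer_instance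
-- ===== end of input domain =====

-- B replaces A's two full-grid quadratic scans by direct generation of the four border
-- edges (shared helper _border); return value only — neither version mutates arguments.

-- ===== PORT A =====
-- literal transliteration of A: double loop with a border test, for the target square
-- (list append) and for the grid border (set add).
def create_simple_test_case (grid_size : Int) : (List (Int × Int)) × (List (Int × Int)) :=
  let center := PySem.Int.floordiv grid_size 2
  let size : Int := 2
  let target_shape : List (Int × Int) :=
    (PySem.List.pyRange (center - size) (center + size + 1) 1).foldl
      (fun ts r =>
        (PySem.List.pyRange (center - size) (center + size + 1) 1).foldl
          (fun ts c =>
            if r = center - size ∨ r = center + size ∨ c = center - size ∨ c = center + size then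
              ts ++ [(r, c)]
            else ts) ts) []
  let obstacles : PySem.Set (Int × Int) :=
    (PySem.List.pyRange 0 grid_size 1).foldl
      (fun s r =>
        (PySem.List.pyRange 0 grid_size 1).foldl
          (fun s c =>
            if r = 0 ∨ r = grid_size - 1 ∨ c = 0 ∨ c = grid_size - 1 then
              PySem.Set.add s (r, c)
            else s) s) PySem.Set.empty
  (target_shape, obstacles)

-- ===== PORT B =====
-- B-side helper: border cells of the square [lo,hi]×[lo,hi], row-major (Source B's _border:
-- top row, then (r,lo)/(r,hi) for the middle rows, then the bottom row).
def pyBorder (lo hi : Int) : List (Int × Int) :=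
  if lo > hi then []
  else if lo < hi then
    ((PySem.List.pyRange (lo + 1) hi 1).foldl
        (fun cs r => cs ++ [(r, lo)] ++ [(r, hi)])
        ((PySem.List.pyRange lo (hi + 1) 1).map (fun c => (lo, c))))
      ++ (PySem.List.pyRange lo (hi + 1) 1).map (fun c => (hi, c))
  else (PySem.List.pyRange lo (hi + 1) 1).map (fun c => (lo, c))

def create_simple_test_case_alt (grid_size : Int) : (List (Int × Int)) × (List (Int × Int)) :=
  let center := PySem.Int.floordiv grid_size 2
  let target_shape := pyBorder (center - 2) (center + 2)
  let obstacles : PySem.Set (Int × Int) := PySem.Set.ofList (pyBorder 0 (grid_size - 1))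
  (target_shape, obstacles)

-- ===== PRECONDITION & SPEC =====
def Spec_create_simple_test_case (grid_size : Int) (out : (List (Int × Int)) × (List (Int × Int))) : Prop := out = create_simple_test_case_alt grid_size
instance (grid_size : Int) (out : (List (Int × Int)) × (List (Int × Int))) : Decidable (Spec_create_simple_test_case grid_size out) := by unfold Spec_create_simple_test_case; infer_instance

-- ===== CLAIM (what is proved, stated in full; the proofs are below) =====
def Claim_equal_create_simple_test_case : Prop := ∀ (grid_size : Int), Dom_create_simple_test_case grid_size → Spec_create_simple_test_case grid_size (create_simple_test_case grid_size)

-- ===== LEMMAS AND PROOFS =====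

-- one row of the filtered square scan
def borderRow (lo hi r : Int) : List (Int × Int) :=
  ((PySem.List.pyRange lo (hi + 1) 1).filter
      (fun c => decide (r = lo ∨ r = hi ∨ c = lo ∨ c = hi))).map (fun c => (r, c))

-- the filtered square scan, as a flat list (shared normal form of both ports)
def borderFlat (lo hi : Int) : List (Int × Int) :=
  (PySem.List.pyRange lo (hi + 1) 1).flatMap (borderRow lo hi)

lemma borderRow_edge (lo hi r : Int) (h : r = lo ∨ r = hi) :
    borderRow lo hi r = (PySem.List.pyRange lo (hi + 1) 1).map (fun c => (r, c)) := by
  unfold borderRow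
  rw [List.filter_eq_self.mpr]
  intro c _
  simp only [decide_eq_true_eq]
  tauto

lemma borderRow_mid (lo hi r : Int) (hlo : lo < r) (hhi : r < hi) :
    borderRow lo hi r = [(r, lo), (r, hi)] := by
  unfold borderRow
  rw [PySem.List.pyRange_one_append lo (lo + 1) (hi + 1) (by omega) (by omega),
      PySem.List.pyRange_one_succ_right (by omega : lo + 1 ≤ hi),
      PySem.List.pyRange_one_singleton]
  rw [List.filter_append, List.filter_append]
  have hmid : (PySem.List.pyRange (lo + 1) hi 1).filter
      (fun c => decide (r = lo ∨ r = hi ∨ c = lo ∨ c = hi)) = [] := by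
    apply List.filter_eq_nil_iff.mpr
    intro c hc
    have := PySem.List.mem_pyRange_one.mp hc
    simp only [decide_eq_true_eq]
    omega
  rw [hmid]
  simp only [List.filter_cons, List.filter_nil, decide_eq_true_eq]
  simp

lemma borderFlat_eq_pyBorder (lo hi : Int) : borderFlat lo hi = pyBorder lo hi := by
  unfold borderFlat pyBorder
  rcases lt_trichotomy lo hi with h | h | h
  · -- lo < hi : split the row range into first row, middle rows, last row
    rw [if_neg (by omega), if_pos h]
    rw [show (fun (cs : List (Int × Int)) (r : Int) => cs ++ [(r, lo)] ++ [(r, hi)])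
          = (fun (cs : List (Int × Int)) (r : Int) => cs ++ [(r, lo), (r, hi)]) by
        funext cs r; simp]
    rw [PySem.List.foldl_append_eq_flatMap]
    conv_lhs =>
      rw [PySem.List.pyRange_one_append lo (lo + 1) (hi + 1) (by omega) (by omega),
          PySem.List.pyRange_one_succ_right (by omega : lo + 1 ≤ hi),
          PySem.List.pyRange_one_singleton]
    simp only [List.flatMap_append, List.flatMap_cons, List.flatMap_nil, List.append_nil]
    rw [borderRow_edge lo hi lo (Or.inl rfl), borderRow_edge lo hi hi (Or.inr rfl)]
    rw [List.flatMap_congr (g := fun r => [(r, lo), (r, hi)]) ?_]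
    · simp
    · intro r hr
      have := PySem.List.mem_pyRange_one.mp hr
      exact borderRow_mid lo hi r (by omega) (by omega)
  · -- lo = hi : a single full row
    subst h
    rw [if_neg (by omega), if_neg (by omega), PySem.List.pyRange_one_singleton,
        List.flatMap_cons, List.flatMap_nil, List.append_nil,
        borderRow_edge lo lo lo (Or.inl rfl), PySem.List.pyRange_one_singleton]
  · -- hi < lo : both empty
    rw [if_pos h, PySem.List.pyRange_one_eq_nil (by omega)]
    simp

-- A's append-style square scan is borderFlat
lemma scan_append_eq_borderFlat (lo hi : Int) :
    (PySem.List.pyRange lo (hi + 1) 1).foldl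
      (fun ts r =>
        (PySem.List.pyRange lo (hi + 1) 1).foldl
          (fun ts c =>
            if r = lo ∨ r = hi ∨ c = lo ∨ c = hi then ts ++ [(r, c)] else ts) ts) []
      = borderFlat lo hi := by
  unfold borderFlat
  have hin : ∀ (r : Int) (acc : List (Int × Int)),
      (PySem.List.pyRange lo (hi + 1) 1).foldl
        (fun ts c => if r = lo ∨ r = hi ∨ c = lo ∨ c = hi then ts ++ [(r, c)] else ts) acc
      = acc ++ borderRow lo hi r := by
    intro r acc
    exact PySem.List.foldl_append_ite _ _ _ _
  simp only [hin]
  rw [PySem.List.foldl_append_eq_flatMap]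
  simp

-- A's set-style square scan is Set.ofList of borderFlat
lemma scan_set_eq_ofList_borderFlat (lo hi : Int) :
    (PySem.List.pyRange lo (hi + 1) 1).foldl
      (fun s r =>
        (PySem.List.pyRange lo (hi + 1) 1).foldl
          (fun s c =>
            if r = lo ∨ r = hi ∨ c = lo ∨ c = hi then PySem.Set.add s (r, c) else s) s)
      PySem.Set.empty
      = PySem.Set.ofList (borderFlat lo hi) := by
  unfold borderFlat
  have hin : ∀ (r : Int) (s : PySem.Set (Int × Int)),
      (PySem.List.pyRange lo (hi + 1) 1).foldl
        (fun s c => if r = lo ∨ r = hi ∨ c = lo ∨ c = hi then PySem.Set.add s (r, c) else s) s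
      = (borderRow lo hi r).foldl PySem.Set.add s := by
    intro r s
    unfold borderRow
    rw [PySem.List.foldl_ite_eq_foldl_filter, List.foldl_map]
  simp only [hin]
  rw [PySem.Set.ofList_eq_foldl, List.flatMap, List.foldl_flatten, List.foldl_map]
  rfl

-- ===== VERDICT (by name: the statement is the Claim_ definition above) =====
theorem create_simple_test_case_spec : Claim_equal_create_simple_test_case := by
  intro n _
  show _ = _
  simp only [create_simple_test_case, create_simple_test_case_alt]
  have htarget := (scan_append_eq_borderFlat (PySem.Int.floordiv n 2 - 2)
      (PySem.Int.floordiv n 2 + 2)).trans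
    (borderFlat_eq_pyBorder (PySem.Int.floordiv n 2 - 2) (PySem.Int.floordiv n 2 + 2))
  have hobs := (scan_set_eq_ofList_borderFlat 0 (n - 1)).trans
    (congrArg PySem.Set.ofList (borderFlat_eq_pyBorder 0 (n - 1)))
  rw [show n - 1 + 1 = n by omega] at hobs
  exact Prod.ext htarget hobs
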